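-- pv_equiv track=rewrite | github.com/Krat0sS/YI-Agent-V3 | data/execution_log.py | get_time_slot
-- ===== SOURCE A (Python) =====
-- def get_time_slot(hour: int) -> str:
--     """将 24 小时制转换为十二时辰"""
--     # 子时跨日：23:00-01:00
--     if hour >= 23 or hour < 1:
--         return 'zi'
--     slots = [
--         (1, 3, 'chou'), (3, 5, 'yin'), (5, 7, 'mao'),
--         (7, 9, 'chen'), (9, 11, 'si'), (11, 13, 'wu'),
--         (13, 15, 'wei'), (15, 17, 'shen'), (17, 19, 'you'),
--         (19, 21, 'xu'), (21, 23, 'hai')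
--     ]
--     for start, end, name in slots:
--         if start <= hour < end:
--             return name
--     return 'zi'
-- ===== SOURCE B (Python) =====
-- def get_time_slot(hour: int) -> str:
--     """将 24 小时制转换为十二时辰"""
--     if hour >= 23 or hour < 1:
--         return 'zi'
--     names = ['chou', 'yin', 'mao', 'chen', 'si', 'wu',
--              'wei', 'shen', 'you', 'xu', 'hai']
--     return names[(hour + 1) // 2 - 1]
-- ===== Notes on version B (the rewrite author's own statement) =====
-- stated objective: simpler
-- what changed: Replaces the linear scan over the (start, end, name) slot table with a closed-form arithmetic index (hour + 1) // 2 - 1 into a names list, keeping the same out-of-range guard.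
import Mathlib
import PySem

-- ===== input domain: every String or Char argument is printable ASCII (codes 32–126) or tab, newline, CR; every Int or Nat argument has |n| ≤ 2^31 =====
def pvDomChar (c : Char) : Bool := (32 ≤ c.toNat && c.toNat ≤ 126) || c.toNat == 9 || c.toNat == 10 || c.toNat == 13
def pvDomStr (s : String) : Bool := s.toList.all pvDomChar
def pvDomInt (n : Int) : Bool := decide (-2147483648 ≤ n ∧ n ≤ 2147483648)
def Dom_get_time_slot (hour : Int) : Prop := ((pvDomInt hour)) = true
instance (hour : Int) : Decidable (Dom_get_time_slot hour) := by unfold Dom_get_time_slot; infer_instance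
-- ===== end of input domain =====

-- B replaces A's linear scan over the slot table by a closed-form arithmetic index into a names list (objective: simpler).

-- ===== PORT A =====
-- the for-loop over the slots table: return the first name whose [start, end) contains hour, else 'zi'
def get_time_slot_loop (hour : Int) : List (Int × Int × String) → String
  | [] => "zi"
  | (start, stop, name) :: rest =>
      if start ≤ hour ∧ hour < stop then name else get_time_slot_loop hour rest

def get_time_slot (hour : Int) : String :=
  if hour ≥ 23 ∨ hour < 1 then "zi"
  else
    let slots : List (Int × Int × String) :=
      [(1, 3, "chou"), (3, 5, "yin"), (5, 7, "mao"),
       (7, 9, "chen"), (9, 11, "si"), (11, 13, "wu"),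
       (13, 15, "wei"), (15, 17, "shen"), (17, 19, "you"),
       (19, 21, "xu"), (21, 23, "hai")]
    get_time_slot_loop hour slots

-- ===== PORT B =====
def get_time_slot_alt (hour : Int) : String :=
  if hour ≥ 23 ∨ hour < 1 then "zi"
  else
    let names : List String :=
      ["chou", "yin", "mao", "chen", "si", "wu",
       "wei", "shen", "you", "xu", "hai"]
    -- names[(hour + 1) // 2 - 1]; the index is always in 0..10 here, so pyGet? is some
    (PySem.List.pyGet? names (PySem.Int.floordiv (hour + 1) 2 - 1)).getD ""

-- ===== PRECONDITION & SPEC =====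
def Spec_get_time_slot (hour : Int) (out : String) : Prop := out = get_time_slot_alt hour
instance (hour : Int) (out : String) : Decidable (Spec_get_time_slot hour out) := by unfold Spec_get_time_slot; infer_instance

-- ===== CLAIM (what is proved, stated in full; the proofs are below) =====
def Claim_equal_get_time_slot : Prop := ∀ (hour : Int), Dom_get_time_slot hour → Spec_get_time_slot hour (get_time_slot hour)

-- ===== LEMMAS AND PROOFS =====

-- ===== VERDICT (by name: the statement is the Claim_ definition above) =====
theorem get_time_slot_spec : Claim_equal_get_time_slot := by
  intro hour _
  unfold Spec_get_time_slot get_time_slot get_time_slot_alt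
  by_cases h : hour ≥ 23 ∨ hour < 1
  · simp [h]
  · have h1 : 1 ≤ hour := by omega
    have h2 : hour ≤ 22 := by omega
    simp only [if_neg h]
    interval_cases hour <;> decide
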